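-- pv_equiv track=rewrite | github.com/PierreP94/Othello | Othello/Othello.py | taken_in_move
-- ===== SOURCE A (Python) =====
-- def taken_in_move(window, mark):
--     count = 0
--     nb_taken = 0
--     for win in window[1:]:
--         if win == '.':
--             break
--         elif win != str(mark) and win != '.':
--             count += 1
--         elif win == str(mark):
--             nb_taken = count
--             break
--     return nb_taken
-- ===== SOURCE B (Python) =====
-- def taken_in_move(window, mark):
--     # Locate-the-terminator: the flipped run length is the offset of the first
--     # occurrence of mark in window[1:], provided it occurs before any '.'.
--     tail = window[1:]
--     m = str(mark)
--     stop = len(tail)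
--     dot = tail.index('.') if '.' in tail else stop
--     mp = tail.index(m) if m in tail else stop
--     return mp if mp < dot else 0
-- ===== Notes on version B (the rewrite author's own statement) =====
-- stated objective: simpler
-- what changed: Replaces A's accumulate-and-break loop over window[1:] with a locate-the-terminator decomposition: find the offset of the first '.' and of the first mark and return the mark's offset only when it comes strictly first, else 0.
import Mathlib
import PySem

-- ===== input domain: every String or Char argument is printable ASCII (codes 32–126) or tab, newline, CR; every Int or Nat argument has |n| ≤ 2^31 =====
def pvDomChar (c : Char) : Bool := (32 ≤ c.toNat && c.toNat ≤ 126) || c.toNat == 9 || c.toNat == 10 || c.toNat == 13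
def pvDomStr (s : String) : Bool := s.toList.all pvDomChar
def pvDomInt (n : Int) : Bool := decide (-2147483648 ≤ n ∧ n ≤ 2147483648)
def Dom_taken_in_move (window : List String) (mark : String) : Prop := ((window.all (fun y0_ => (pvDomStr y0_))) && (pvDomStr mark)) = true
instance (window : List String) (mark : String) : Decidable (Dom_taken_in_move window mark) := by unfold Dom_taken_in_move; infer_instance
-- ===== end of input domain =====

-- B replaces A's accumulate-and-break loop by locating the first '.' and the first mark
-- in window[1:] and comparing their offsets (objective: simpler decomposition, same cost).

-- ===== PORT A =====
-- the for-loop of A with its `count` accumulator and the two break exits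
def taken_in_move_loop : List String → String → Int → Int
  | [], _, _ => 0                      -- loop ends: nb_taken still 0
  | w :: ws, m, count =>
      if w = "." then 0                -- break, nb_taken = 0
      else if w ≠ m ∧ w ≠ "." then taken_in_move_loop ws m (count + 1)
      else if w = m then count         -- nb_taken = count; break
      else taken_in_move_loop ws m count  -- (unreachable) no branch fired: continue

def taken_in_move (window : List String) (mark : String) : Int :=
  taken_in_move_loop (PySem.List.slice window (some 1) none) mark 0

-- ===== PORT B =====
def taken_in_move_alt (window : List String) (mark : String) : Int :=
  let tail := PySem.List.slice window (some 1) none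
  let m := mark                        -- str(mark) on a str is the string itself
  let stop : Int := tail.length
  let dot : Int := if "." ∈ tail then ((PySem.List.index? tail ".").getD 0 : Nat) else stop
  let mp : Int := if m ∈ tail then ((PySem.List.index? tail m).getD 0 : Nat) else stop
  if mp < dot then mp else 0

-- ===== PRECONDITION & SPEC =====
def Spec_taken_in_move (window : List String) (mark : String) (out : Int) : Prop := out = taken_in_move_alt window mark
instance (window : List String) (mark : String) (out : Int) : Decidable (Spec_taken_in_move window mark out) := by unfold Spec_taken_in_move; infer_instance

-- ===== CLAIM (what is proved, stated in full; the proofs are below) =====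
def Claim_equal_taken_in_move : Prop := ∀ (window : List String) (mark : String), Dom_taken_in_move window mark → Spec_taken_in_move window mark (taken_in_move window mark)

-- ===== LEMMAS AND PROOFS =====

-- offset of the first occurrence of v in t, or t.length if absent
def pvIdxD (t : List String) (v : String) : Nat := ((PySem.List.index? t v).getD t.length)

theorem pvIdxD_cons_self (t : List String) (v : String) : pvIdxD (v :: t) v = 0 := by
  unfold pvIdxD
  rw [PySem.List.index?_cons_self]
  rfl

theorem pvIdxD_cons_of_ne {w v : String} (t : List String) (h : w ≠ v) :
    pvIdxD (w :: t) v = pvIdxD t v + 1 := by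
  unfold pvIdxD
  rw [PySem.List.index?_cons_of_ne (h := h)]
  cases hix : PySem.List.index? t v <;>
    simp only [Option.map_none, Option.map_some, Option.getD_none, Option.getD_some,
      List.length_cons]

theorem pvIdxD_eq (t : List String) (v : String) :
    (if v ∈ t then (((PySem.List.index? t v).getD 0 : Nat) : Int) else (t.length : Int))
      = (pvIdxD t v : Int) := by
  unfold pvIdxD
  by_cases h : v ∈ t
  · have hs := (PySem.List.index?_isSome_iff (xs := t) (v := v)).2 h
    cases hix : PySem.List.index? t v with
    | none => rw [hix] at hs; simp at hs
    | some k => simp [h]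
  · have hnone : PySem.List.index? t v = none := by
      rw [PySem.List.index?_eq_none_iff]; exact h
    rw [hnone]; simp [h]

theorem pvLoop_eq (t : List String) (m : String) (c : Int) :
    taken_in_move_loop t m c =
      if pvIdxD t m < pvIdxD t "." then c + (pvIdxD t m : Int) else 0 := by
  induction t generalizing c with
  | nil =>
      unfold taken_in_move_loop pvIdxD
      have h : ∀ v : String, PySem.List.index? ([] : List String) v = none := by
        intro v; rw [PySem.List.index?_eq_none_iff]; simp
      rw [h, h]; simp
  | cons w ws ih =>
      by_cases hdot : w = "."
      · subst hdot
        rw [taken_in_move_loop, pvIdxD_cons_self]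
        simp
      · by_cases hm : w = m
        · subst hm
          rw [taken_in_move_loop, pvIdxD_cons_self, pvIdxD_cons_of_ne ws hdot]
          simp [hdot]
        · rw [taken_in_move_loop, pvIdxD_cons_of_ne ws hm, pvIdxD_cons_of_ne ws hdot]
          rw [if_neg hdot, if_pos ⟨hm, hdot⟩, ih]
          split_ifs with h1 h2 h2
          · push_cast; ring
          · omega
          · omega
          · rfl

-- ===== VERDICT (by name: the statement is the Claim_ definition above) =====
theorem taken_in_move_spec : Claim_equal_taken_in_move := by
  intro window mark _
  unfold Spec_taken_in_move taken_in_move taken_in_move_alt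
  simp only [pvIdxD_eq, pvLoop_eq]
  split_ifs with h h2 h2
  · simp
  · exact absurd (by exact_mod_cast h) h2
  · exact absurd (by exact_mod_cast h2) h
  · rfl
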